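-- pv_equiv track=rewrite | github.com/AlkaiDynamics/th.ink-tattoo-visualization | src/deployment/html_report_generator.py | _format_verification_results
-- ===== SOURCE A (Python) =====
-- from typing import Dict, List
--
-- def _format_verification_results(results: List[Dict]) -> Dict:
--     """Format verification results for display"""
--     summary = {
--         'errors': [],
--         'warnings': [],
--         'info': []
--     }
--
--     for result in results:
--         category = result['status']
--         if category in summary:
--             summary[category].append(result)
--
--     return summary
-- ===== SOURCE B (Python) =====
-- from typing import Dict, List
--
-- def _format_verification_results(results: List[Dict]) -> Dict:
--     """Format verification results for display"""
--     return {
--         'errors': [r for r in results if r['status'] == 'errors'],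
--         'warnings': [r for r in results if r['status'] == 'warnings'],
--         'info': [r for r in results if r['status'] == 'info'],
--     }
-- ===== Notes on version B (the rewrite author's own statement) =====
-- stated objective: alternative
-- what changed: The single status-routed loop that mutates a dict of buckets is replaced by a dict literal whose three fixed keys are each filled by an independent filtering pass over the results.
import Mathlib
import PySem

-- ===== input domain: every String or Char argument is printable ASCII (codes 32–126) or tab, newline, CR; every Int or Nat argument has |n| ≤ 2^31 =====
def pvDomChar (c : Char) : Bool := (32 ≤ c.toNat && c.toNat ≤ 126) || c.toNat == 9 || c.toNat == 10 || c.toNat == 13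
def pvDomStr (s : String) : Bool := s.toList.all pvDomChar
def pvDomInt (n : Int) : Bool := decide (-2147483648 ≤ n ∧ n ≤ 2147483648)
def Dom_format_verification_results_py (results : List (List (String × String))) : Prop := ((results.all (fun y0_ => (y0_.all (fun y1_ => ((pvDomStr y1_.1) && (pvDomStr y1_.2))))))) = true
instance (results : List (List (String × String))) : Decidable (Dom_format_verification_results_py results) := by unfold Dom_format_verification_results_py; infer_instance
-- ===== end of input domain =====

-- B replaces A's single status-routed loop over a mutable dict of buckets by a dict
-- literal built from three independent filtering passes (objective: alternative).

-- ===== PORT A =====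
-- result['status'] : first match in the assoc list (Python dict lookup); KeyError
-- (no "status" key) is excluded by Pre_ below, so the getD "" default is never used there.
def fvrStatus (r : List (String × String)) : Option String :=
  (PySem.Dict.mk r).get? "status"

def fvrStep (s : PySem.Dict String (List (List (String × String))))
    (r : List (String × String)) : PySem.Dict String (List (List (String × String))) :=
  let category := (fvrStatus r).getD ""
  if s.contains category then s.modify category [] (· ++ [r]) else s

def format_verification_results_py (results : List (List (String × String))) :
    List (String × List (List (String × String))) :=
  (results.foldl fvrStep
    (PySem.Dict.ofList [("errors", []), ("warnings", []), ("info", [])])).items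

-- ===== PORT B =====
def format_verification_results_py_alt (results : List (List (String × String))) :
    List (String × List (List (String × String))) :=
  [("errors",   results.filter (fun r => fvrStatus r == some "errors")),
   ("warnings", results.filter (fun r => fvrStatus r == some "warnings")),
   ("info",     results.filter (fun r => fvrStatus r == some "info"))]

-- ===== PRECONDITION & SPEC =====
-- Pre_ excludes exactly the inputs where a result lacks a "status" key: there the
-- Python A raises KeyError (and so does B).
def Pre_format_verification_results_py (results : List (List (String × String))) : Prop :=
  (results.all (fun r => r.any (fun p => p.1 == "status"))) = true
instance (results : List (List (String × String))) : Decidable (Pre_format_verification_results_py results) := by unfold Pre_format_verification_results_py; infer_instance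

def pvWitness_format_verification_results_py : (List (List (String × String))) :=
  [[("status", "errors"), ("msg", "bad")], [("status", "info")], [("status", "other")]]

def Spec_format_verification_results_py (results : List (List (String × String))) (out : List (String × List (List (String × String)))) : Prop := out = format_verification_results_py_alt results
instance (results : List (List (String × String))) (out : List (String × List (List (String × String)))) : Decidable (Spec_format_verification_results_py results out) := by unfold Spec_format_verification_results_py; infer_instance

-- ===== CLAIM (what is proved, stated in full; the proofs are below) =====
def Claim_equal_format_verification_results_py : Prop := ∀ (results : List (List (String × String))), Dom_format_verification_results_py results → Pre_format_verification_results_py results → Spec_format_verification_results_py results (format_verification_results_py results)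

-- ===== LEMMAS AND PROOFS =====

-- One loop step on the three-bucket literal dict routes r into (at most) one bucket.
theorem fvrStep_eq (e w i : List (List (String × String))) (r : List (String × String)) :
    fvrStep (PySem.Dict.mk [("errors", e), ("warnings", w), ("info", i)]) r =
    PySem.Dict.mk
      [("errors",   if fvrStatus r == some "errors"   then e ++ [r] else e),
       ("warnings", if fvrStatus r == some "warnings" then w ++ [r] else w),
       ("info",     if fvrStatus r == some "info"     then i ++ [r] else i)] := by
  unfold fvrStep
  cases h : fvrStatus r with
  | none => simp [PySem.Dict.contains]
  | some c =>
    by_cases h1 : c = "errors"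
    · subst h1; simp [PySem.Dict.contains, PySem.Dict.modify, PySem.Dict.insert,
        PySem.Dict.getD, PySem.Dict.get?]
    · by_cases h2 : c = "warnings"
      · subst h2; simp [PySem.Dict.contains, PySem.Dict.modify, PySem.Dict.insert,
          PySem.Dict.getD, PySem.Dict.get?]
      · by_cases h3 : c = "info"
        · subst h3; simp [PySem.Dict.contains, PySem.Dict.modify, PySem.Dict.insert,
            PySem.Dict.getD, PySem.Dict.get?]
        · simp only [PySem.Dict.contains, Option.getD_some]
          rw [if_neg]
          · simp only [beq_iff_eq, Option.some.injEq]
            rw [if_neg h1, if_neg h2, if_neg h3]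
          · simp only [List.any_cons, List.any_nil, Bool.or_eq_true,
              beq_iff_eq, Bool.false_eq_true, or_false]
            intro hc
            rcases hc with hc | hc | hc
            exacts [h1 hc.symm, h2 hc.symm, h3 hc.symm]

-- Loop invariant: folding A's step over l appends the filtered elements to each bucket.
theorem fvr_loop_inv (l : List (List (String × String)))
    (e w i : List (List (String × String))) :
    l.foldl fvrStep (PySem.Dict.mk [("errors", e), ("warnings", w), ("info", i)]) =
    PySem.Dict.mk
      [("errors",   e ++ l.filter (fun r => fvrStatus r == some "errors")),
       ("warnings", w ++ l.filter (fun r => fvrStatus r == some "warnings")),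
       ("info",     i ++ l.filter (fun r => fvrStatus r == some "info"))] := by
  induction l generalizing e w i with
  | nil => simp
  | cons r t ih =>
    simp only [List.foldl_cons, fvrStep_eq, ih, List.filter_cons]
    by_cases h1 : (fvrStatus r == some "errors") = true <;>
      by_cases h2 : (fvrStatus r == some "warnings") = true <;>
        by_cases h3 : (fvrStatus r == some "info") = true <;>
          simp [h1, h2, h3]

-- ===== VERDICT (by name: the statement is the Claim_ definition above) =====
theorem format_verification_results_py_spec : Claim_equal_format_verification_results_py := by
  intro results _ _
  unfold Spec_format_verification_results_py format_verification_results_py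
    format_verification_results_py_alt
  have h0 : (PySem.Dict.ofList [("errors", ([] : List (List (String × String)))), ("warnings", []), ("info", [])]) =
      PySem.Dict.mk [("errors", []), ("warnings", []), ("info", [])] := by decide
  rw [h0, fvr_loop_inv]
  rfl
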